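-- pv_equiv track=rewrite | github.com/Robeenx/tasks2 | randomes/lists/consecutive_nums.py | consecutive_nums
-- ===== SOURCE A (Python) =====
-- from collections import Counter
--
-- def consecutive_nums(lst: list, n: int) -> bool:
--     """
--     Определяет можно ли разбить список целых чисел на группы по N элементов,
--     которые являются последовательностью, так что бы были задействованы все
--     элементы исходного списка.
--     """
--     if not len(lst) % n:
--         arr, out = dict(sorted(Counter(lst).items(), key=lambda x: x[0])), []
--         for _ in range(len(lst) // n):
--             out.append(list(arr)[:n])
--             for x in out[-1]:
--                 arr[x] -= 1
--                 if not arr[x]: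
--                     del arr[x]
--         if len(set().union(*[{v - x[i-1] for i, v in enumerate(x) if i} for x in out])) < 2:
--             return True
--     return False
-- ===== SOURCE B (Python) =====
-- from collections import Counter
--
-- def consecutive_nums(lst: list, n: int) -> bool:
--     """Epoch-compressed simulation: instead of materialising one group per
--     round, it detects that consecutive rounds strip the SAME key prefix until
--     some prefix count runs out, and processes that whole run in one arithmetic
--     step (record the prefix's steps once -- diffs is a set -- and subtract the
--     run length from every prefix count)."""
--     if len(lst) % n:
--         return False
--     alive = sorted(Counter(lst).items())
--     rounds_left = len(lst) // n
--     diffs = set()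
--     while rounds_left > 0 and alive:
--         g = alive[:n]
--         diffs.update(b[0] - a[0] for a, b in zip(g, g[1:]))
--         t = min(min(c for _, c in g), rounds_left)
--         rounds_left -= t
--         alive = [(k, c - t) for k, c in g if c > t] + alive[n:]
--     return len(diffs) < 2
-- ===== Notes on version B (the rewrite author's own statement) =====
-- stated objective: alternative
-- what changed: A simulates every round separately, rebuilding the dict's key list once per group and deriving the step set afterwards from the stored groups; B compresses each maximal run of identical rounds (rounds strip the same key prefix until a prefix count is exhausted) into one arithmetic step: record the prefix's steps once into the set, subtract the run length from the prefix counts, drop exhausted keys.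
-- outside the precondition, e.g. on consecutive_nums([1, 2], 0): A raises ZeroDivisionError, B raises ZeroDivisionError
import Mathlib
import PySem

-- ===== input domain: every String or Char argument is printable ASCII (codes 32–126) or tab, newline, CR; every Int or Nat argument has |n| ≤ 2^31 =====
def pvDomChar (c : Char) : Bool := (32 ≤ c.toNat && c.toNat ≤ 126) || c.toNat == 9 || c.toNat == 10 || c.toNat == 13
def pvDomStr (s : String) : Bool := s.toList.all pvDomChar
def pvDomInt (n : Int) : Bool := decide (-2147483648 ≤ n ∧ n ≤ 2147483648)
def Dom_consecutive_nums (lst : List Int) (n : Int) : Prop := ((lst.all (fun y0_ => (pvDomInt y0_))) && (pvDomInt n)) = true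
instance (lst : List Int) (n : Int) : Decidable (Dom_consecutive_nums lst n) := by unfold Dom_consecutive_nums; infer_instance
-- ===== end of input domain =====

-- B replaces A's round-by-round simulation (one dict-key-list rebuild per group) by an
-- epoch-compressed one: a maximal run of rounds stripping the same key prefix is processed
-- in one arithmetic step (objective: alternative).

-- ===== PORT A =====
-- one iteration of A's outer loop: group = first n keys, decrement each, delete empties
def aRound (n : Int) (st : PySem.Dict Int Int × List (List Int)) :
    PySem.Dict Int Int × List (List Int) :=
  let g := PySem.List.slice st.1.keys none (some n)
  let arr := g.foldl (fun a x =>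
      let a := a.modify x 0 (fun v => v - 1)
      if a.getD x 0 == 0 then a.erase x else a) st.1
  (arr, st.2 ++ [g])

-- the set comprehension { v - x[i-1] for i, v in enumerate(x) if i }
def aGroupDiffs (x : List Int) : PySem.Set Int :=
  (PySem.List.enumerate x).foldl
    (fun (acc : PySem.Set Int) iv =>
      if iv.1 ≠ 0 then PySem.Set.add acc (iv.2 - PySem.List.pyGetD x (iv.1 - 1) 0) else acc)
    PySem.Set.empty

def consecutive_nums (lst : List Int) (n : Int) : Bool :=
  if PySem.Int.mod (PySem.List.len lst) n == 0 then
    let arr0 : PySem.Dict Int Int :=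
      PySem.Dict.ofList (PySem.List.sorted (PySem.Dict.counter lst).items (fun p => p.1) false)
    let st := (PySem.List.pyRange 0 (PySem.Int.floordiv (PySem.List.len lst) n)).foldl
      (fun st _ => aRound n st) (arr0, ([] : List (List Int)))
    let u := st.2.foldl (fun (s : PySem.Set Int) x => PySem.Set.union s (aGroupDiffs x))
      PySem.Set.empty
    decide (PySem.Set.len u < 2)
  else false

-- ===== PORT B =====
-- Source B's while loop: one recursive call per EPOCH (a maximal run of identical rounds).
-- g = alive[:n]; its steps are recorded once (diffs is a set); t = min(min count of g,
-- rounds_left) rounds are performed at once by subtracting t from the prefix counts.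
-- The extra Nat 'fuel' (initialised to rounds_left) is a termination-only guard: every
-- reached epoch performs t ≥ 1 rounds, so the fuel never runs out where Python loops.
def bEpoch (n : Int) : Nat → Int → List (Int × Int) → PySem.Set Int → PySem.Set Int
  | 0, _, _, diffs => diffs
  | fuel + 1, rounds, alive, diffs =>
    if rounds ≤ 0 ∨ alive = [] then diffs
    else
      let g := PySem.List.slice alive none (some n)
      let diffs' := PySem.Set.update diffs ((g.zip g.tail).map (fun p => p.2.1 - p.1.1))
      -- min(c for _, c in g): a running min over the counts (g is nonempty when reached)
      let mc := (g.map Prod.snd).foldl min (g.headD (0, 0)).2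
      let t := min mc rounds
      bEpoch n fuel (rounds - t)
        (((g.filter (fun p => decide (t < p.2))).map (fun p => (p.1, p.2 - t)))
          ++ PySem.List.slice alive (some n) none)
        diffs'

-- Source B sorts the (key, count) pairs lexicographically; keys are distinct, so that is
-- exactly sorting by the key component
def consecutive_nums_alt (lst : List Int) (n : Int) : Bool :=
  if PySem.Int.mod (PySem.List.len lst) n != 0 then false
  else
    let alive := PySem.List.sorted (PySem.Dict.counter lst).items (fun p => p.1) false
    let diffs := bEpoch n (PySem.Int.floordiv (PySem.List.len lst) n).toNat
      (PySem.Int.floordiv (PySem.List.len lst) n) alive PySem.Set.empty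
    decide (PySem.Set.len diffs < 2)

-- ===== PRECONDITION & SPEC =====
-- Pre_ excludes exactly n = 0, where A raises ZeroDivisionError on len(lst) % n.
def Pre_consecutive_nums (lst : List Int) (n : Int) : Prop := n ≠ 0
instance (lst : List Int) (n : Int) : Decidable (Pre_consecutive_nums lst n) := by
  unfold Pre_consecutive_nums; infer_instance
def pvWitness_consecutive_nums : List Int × Int := ([1, 2, 5, 6], 2)

def Spec_consecutive_nums (lst : List Int) (n : Int) (out : Bool) : Prop := out = consecutive_nums_alt lst n
instance (lst : List Int) (n : Int) (out : Bool) : Decidable (Spec_consecutive_nums lst n out) := by unfold Spec_consecutive_nums; infer_instance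

-- ===== CLAIM (what is proved, stated in full; the proofs are below) =====
def Claim_equal_consecutive_nums : Prop := ∀ (lst : List Int) (n : Int), Dom_consecutive_nums lst n → Pre_consecutive_nums lst n → Spec_consecutive_nums lst n (consecutive_nums lst n)

-- ===== LEMMAS AND PROOFS =====

-- consecutive differences of a group, in order
def cdiffs (x : List Int) : List Int := (x.zip x.tail).map (fun p => p.2 - p.1)

-- what survives one round of decrements out of the processed prefix
def survOf (l : List (Int × Int)) : List (Int × Int) :=
  (l.filter (fun p => decide (1 < p.2))).map (fun p => (p.1, p.2 - 1))

-- one round of A's process on the sorted (key, count) list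
def stepA (j : Nat) (L : List (Int × Int)) : List (Int × Int) :=
  survOf (L.take j) ++ L.drop j

-- the groups A's r rounds produce
def Agroups (j : Nat) : Nat → List (Int × Int) → List (List Int)
  | 0, _ => []
  | r + 1, L => (L.map Prod.fst).take j :: Agroups j r (stepA j L)

theorem update_ofList_eq (s : PySem.Set Int) (l : List Int) :
    PySem.Set.update s (PySem.Set.ofList l) = PySem.Set.update s l := by
  rw [PySem.Set.update_eq_append_filter, PySem.Set.update_eq_append_filter,
    PySem.Set.ofList_ofList]

theorem enum_map_diffs (xs pre' : List Int) (a : Int) :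
    (PySem.List.enumerate xs ((pre' ++ [a]).length : Int)).map
        (fun iv => iv.2 - PySem.List.pyGetD ((pre' ++ [a]) ++ xs) (iv.1 - 1) 0)
      = ((a :: xs).zip xs).map (fun q => q.2 - q.1) := by
  induction xs generalizing pre' a with
  | nil => simp [PySem.List.enumerate_nil]
  | cons b t ih =>
    rw [PySem.List.enumerate_cons]
    simp only [List.map_cons, List.zip_cons_cons, List.cons.injEq]
    constructor
    · have h1 : ((pre' ++ [a]).length : Int) - 1 = ((pre'.length : Nat) : Int) := by
        simp only [List.length_append, List.length_cons, List.length_nil]; push_cast; ring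
      rw [h1, PySem.List.pyGetD_natCast]
      have : (pre' ++ [a] ++ b :: t).getD pre'.length 0 = a := by
        rw [List.append_assoc]
        simp [List.getD]
      rw [this]
    · have h2 : ((pre' ++ [a]).length : Int) + 1 = (((pre' ++ [a]) ++ [b]).length : Int) := by
        simp only [List.length_append, List.length_cons, List.length_nil]; push_cast; ring
      have h3 : (pre' ++ [a]) ++ b :: t = (((pre' ++ [a]) ++ [b])) ++ t := by simp
      rw [h2, h3]
      exact ih (pre' ++ [a]) b

theorem aGroupDiffs_eq (x : List Int) :
    aGroupDiffs x = PySem.Set.ofList (cdiffs x) := by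
  cases x with
  | nil => simp [aGroupDiffs, cdiffs, PySem.List.enumerate_nil]
  | cons a t =>
    unfold aGroupDiffs
    rw [PySem.List.foldl_ite_eq_foldl_filter]
    have hfil : ((PySem.List.enumerate (a :: t)).filter (fun iv => decide (iv.1 ≠ 0)))
        = PySem.List.enumerate t 1 := by
      rw [PySem.List.enumerate_cons, List.filter_cons]
      rw [if_neg (by simp)]
      rw [List.filter_eq_self.mpr, zero_add]
      intro p hp
      rw [PySem.List.mem_enumerate_iff] at hp
      obtain ⟨k, hk, rfl⟩ := hp
      simp; omega
    rw [hfil]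
    rw [← PySem.Set.update_map_eq_foldl_add (PySem.List.enumerate t 1)
        (fun iv => iv.2 - PySem.List.pyGetD (a :: t) (iv.1 - 1) 0) PySem.Set.empty]
    have h3 := enum_map_diffs t [] a
    simp only [List.nil_append, List.singleton_append, List.length_cons, List.length_nil,
      Nat.cast_one, Nat.zero_add] at h3
    rw [h3]
    simp [cdiffs]
    rfl

theorem map_eq_self_of_ne (P : List (Int × Int)) (k : Int) (v : Int × Int)
    (h : k ∉ P.map Prod.fst) :
    P.map (fun p => if p.1 == k then v else p) = P := by
  conv_rhs => rw [← List.map_id P]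
  apply List.map_congr_left
  intro p hp
  have : p.1 ≠ k := fun he => h (he ▸ List.mem_map_of_mem hp)
  simp [this]

theorem filter_eq_self_of_ne (P : List (Int × Int)) (k : Int)
    (h : k ∉ P.map Prod.fst) :
    P.filter (fun p => !(p.1 == k)) = P := by
  apply List.filter_eq_self.mpr
  intro p hp
  have : p.1 ≠ k := fun he => h (he ▸ List.mem_map_of_mem hp)
  simp [this]

theorem aRound_fold (j : Nat) (P L : List (Int × Int))
    (hnd : ((P ++ L).map Prod.fst).Nodup) (hv : ∀ p ∈ L, 1 ≤ p.2) :
    (((L.map Prod.fst).take j).foldl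
        (fun a x =>
          let a := a.modify x 0 (fun v => v - 1)
          if a.getD x 0 == 0 then a.erase x else a)
        (PySem.Dict.mk (P ++ L)))
      = PySem.Dict.mk (P ++ (survOf (L.take j) ++ L.drop j)) := by
  induction j generalizing P L with
  | zero => simp [survOf]
  | succ j ih =>
    cases L with
    | nil => simp [survOf]
    | cons kc rest =>
      obtain ⟨k, c⟩ := kc
      have hk2 : k ∉ List.map Prod.fst P ∧ k ∉ List.map Prod.fst rest := by
        have hnd' := hnd
        simp only [List.map_append, List.map_cons, List.nodup_append, List.nodup_cons] at hnd'
        obtain ⟨h1, ⟨h2, h3⟩, h4⟩ := hnd'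
        exact ⟨fun hm => h4 k hm k (List.mem_cons_self) rfl, h2⟩
      obtain ⟨hk_notP, hk_notrest⟩ := hk2
      simp only [List.map_cons, List.take_succ_cons, List.foldl_cons]
      have hget : (PySem.Dict.mk (P ++ (k, c) :: rest)).getD k 0 = c := by
        apply PySem.Dict.getD_of_mem_items
        · simp
        · simpa [PySem.Dict.keys] using hnd
      have hcont : (PySem.Dict.mk (P ++ (k, c) :: rest)).contains k = true := by
        simp [PySem.Dict.contains]
      have hmod : (PySem.Dict.mk (P ++ (k, c) :: rest)).modify k 0 (fun v => v - 1)
          = PySem.Dict.mk (P ++ (k, c - 1) :: rest) := by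
        rw [PySem.Dict.modify, hget, PySem.Dict.insert, if_pos hcont]
        have : (P ++ (k, c) :: rest).map (fun p => if p.1 == k then (k, c - 1) else p)
            = P ++ (k, c - 1) :: rest := by
          rw [List.map_append, List.map_cons]
          rw [map_eq_self_of_ne P k _ hk_notP, map_eq_self_of_ne rest k _ hk_notrest]
          simp
        simpa using congrArg PySem.Dict.mk this
      have hnd1 : ((P ++ (k, c - 1) :: rest).map Prod.fst).Nodup := by
        simpa using hnd
      have hget2 : (PySem.Dict.mk (P ++ (k, c - 1) :: rest)).getD k 0 = c - 1 := by
        apply PySem.Dict.getD_of_mem_items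
        · simp
        · simpa [PySem.Dict.keys] using hnd1
      by_cases hc : c = 1
      · have hz : c - 1 = 0 := by omega
        have hstep :
            (let a := (PySem.Dict.mk (P ++ (k, c) :: rest)).modify k 0 (fun v => v - 1)
             if a.getD k 0 == 0 then a.erase k else a) = PySem.Dict.mk (P ++ rest) := by
          show (if ((PySem.Dict.mk (P ++ (k, c) :: rest)).modify k 0 (fun v => v - 1)).getD k 0 == 0
              then ((PySem.Dict.mk (P ++ (k, c) :: rest)).modify k 0 (fun v => v - 1)).erase k
              else (PySem.Dict.mk (P ++ (k, c) :: rest)).modify k 0 (fun v => v - 1))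
            = PySem.Dict.mk (P ++ rest)
          rw [hmod, if_pos (by rw [hget2, hz]; simp)]
          rw [PySem.Dict.erase]
          show PySem.Dict.mk ((P ++ (k, c - 1) :: rest).filter (fun p => !(p.1 == k)))
            = PySem.Dict.mk (P ++ rest)
          congr 1
          rw [List.filter_append, List.filter_cons]
          simp only [beq_self_eq_true, Bool.not_true, Bool.false_eq_true, reduceIte]
          rw [filter_eq_self_of_ne P k hk_notP, filter_eq_self_of_ne rest k hk_notrest]
        rw [hstep]
        have hnd3 : ((P ++ rest).map Prod.fst).Nodup := by
          have hs : List.Sublist (List.map Prod.fst (P ++ rest)) (List.map Prod.fst (P ++ (k, c) :: rest)) := by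
            simp only [List.map_append, List.map_cons]
            exact (List.sublist_cons_self _ _).append_left _
          exact hnd.sublist hs
        have := ih P rest hnd3 (fun p hp => hv p (List.mem_cons_of_mem _ hp))
        rw [this]
        have hs : survOf ((k, c) :: List.take j rest) = survOf (List.take j rest) := by
          simp [survOf, hc]
        simp [hs]
      · have hstep :
            (let a := (PySem.Dict.mk (P ++ (k, c) :: rest)).modify k 0 (fun v => v - 1)
             if a.getD k 0 == 0 then a.erase k else a)
            = PySem.Dict.mk ((P ++ [(k, c - 1)]) ++ rest) := by
          show (if ((PySem.Dict.mk (P ++ (k, c) :: rest)).modify k 0 (fun v => v - 1)).getD k 0 == 0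
              then ((PySem.Dict.mk (P ++ (k, c) :: rest)).modify k 0 (fun v => v - 1)).erase k
              else (PySem.Dict.mk (P ++ (k, c) :: rest)).modify k 0 (fun v => v - 1))
            = PySem.Dict.mk ((P ++ [(k, c - 1)]) ++ rest)
          rw [hmod, if_neg (by simp [hget2]; omega)]
          simp
        rw [hstep]
        have hnd2 : (((P ++ [(k, c - 1)]) ++ rest).map Prod.fst).Nodup := by
          simpa using hnd
        have := ih (P ++ [(k, c - 1)]) rest hnd2 (fun p hp => hv p (List.mem_cons_of_mem _ hp))
        rw [this]
        have hc1 : 1 ≤ c := hv (k, c) (List.mem_cons_self)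
        have hgt : 1 < c := by omega
        have hs : survOf ((k, c) :: List.take j rest)
            = (k, c - 1) :: survOf (List.take j rest) := by
          simp [survOf, hgt]
        simp [hs]

theorem one_roundA (n : Int) (hn : 0 < n) (L : List (Int × Int)) (out : List (List Int))
    (hnd : (L.map Prod.fst).Nodup) (hv : ∀ p ∈ L, 1 ≤ p.2) :
    aRound n (PySem.Dict.mk L, out)
      = (PySem.Dict.mk (stepA n.toNat L),
         out ++ [(L.map Prod.fst).take n.toNat]) := by
  unfold aRound stepA
  have hkeys : (PySem.Dict.mk L).keys = L.map Prod.fst := rfl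
  have hg : PySem.List.slice (PySem.Dict.mk L).keys none (some n)
      = (L.map Prod.fst).take n.toNat := by
    rw [hkeys, PySem.List.slice_to _ (le_of_lt hn)]
  simp only [hg]
  have := aRound_fold n.toNat [] L (by simpa using hnd) hv
  simp only [List.nil_append] at this
  rw [this]

-- general shape of both processes' survivor lists: keys form a sublist of the old keys
theorem shift_fst_sublist (j : Nat) (k : Int) (P : Int × Int → Bool) (L : List (Int × Int)) :
    ((((L.take j).filter P).map (fun p => (p.1, p.2 - k)) ++ L.drop j).map Prod.fst).Sublist
      (L.map Prod.fst) := by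
  rw [List.map_append, List.map_map]
  have hf : ((L.take j).filter P).map (Prod.fst ∘ fun p => (p.1, p.2 - k))
      = ((L.take j).filter P).map Prod.fst := List.map_congr_left (fun p _ => rfl)
  rw [hf]
  have hA : (((L.take j).filter P).map Prod.fst).Sublist ((L.take j).map Prod.fst) :=
    ((L.take j).filter_sublist).map Prod.fst
  have h2 := hA.append (List.Sublist.refl ((L.drop j).map Prod.fst))
  have h3 : (L.take j).map Prod.fst ++ (L.drop j).map Prod.fst = L.map Prod.fst := by
    rw [← List.map_append, List.take_append_drop]
  exact h3 ▸ h2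

theorem bulk_pos (j : Nat) (k : Int) (hk : 0 ≤ k) (L : List (Int × Int))
    (h : ∀ p ∈ L, 1 ≤ p.2) :
    ∀ p ∈ ((L.take j).filter (fun p => decide (k < p.2))).map (fun p => (p.1, p.2 - k))
        ++ L.drop j, 1 ≤ p.2 := by
  intro p hp
  rcases List.mem_append.mp hp with hm | hm
  · rcases List.mem_map.mp hm with ⟨q, hq, rfl⟩
    have := List.of_mem_filter hq
    simp only [decide_eq_true_eq] at this
    simp only []
    omega
  · exact h p (List.mem_of_mem_drop hm)

theorem stepA_eq_bulk (j : Nat) (L : List (Int × Int)) :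
    stepA j L = ((L.take j).filter (fun p => decide ((1:Int) < p.2))).map
        (fun p => (p.1, p.2 - 1)) ++ L.drop j := rfl

theorem stepA_nodup (j : Nat) (L : List (Int × Int)) (hnd : (L.map Prod.fst).Nodup) :
    ((stepA j L).map Prod.fst).Nodup := by
  rw [stepA_eq_bulk]
  exact hnd.sublist (shift_fst_sublist j 1 _ L)

theorem stepA_pos (j : Nat) (L : List (Int × Int)) (h : ∀ p ∈ L, 1 ≤ p.2) :
    ∀ p ∈ stepA j L, 1 ≤ p.2 := by
  rw [stepA_eq_bulk]
  exact bulk_pos j 1 (by omega) L h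

-- A's r rounds produce exactly the groups 'Agroups'
theorem A_fold (n : Int) (hn : 0 < n) :
    ∀ (rl : List Int) (L : List (Int × Int)) (out : List (List Int)),
    ((L.map Prod.fst).Nodup) → (∀ p ∈ L, 1 ≤ p.2) →
    (rl.foldl (fun st _ => aRound n st) (PySem.Dict.mk L, out)).2
      = out ++ Agroups n.toNat rl.length L := by
  intro rl
  induction rl with
  | nil => intro L out _ _; simp [Agroups]
  | cons a rl ih =>
    intro L out hnd hv
    simp only [List.foldl_cons]
    rw [one_roundA n hn L out hnd hv]
    rw [ih (stepA n.toNat L) (out ++ [(L.map Prod.fst).take n.toNat])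
      (stepA_nodup _ _ hnd) (stepA_pos _ _ hv)]
    simp [Agroups]

-- ===== B-side lemmas =====
theorem cdiffs_map_fst (g : List (Int × Int)) :
    ((g.zip g.tail).map (fun p => p.2.1 - p.1.1)) = cdiffs (g.map Prod.fst) := by
  induction g with
  | nil => rfl
  | cons a t ih =>
    cases t with
    | nil => rfl
    | cons b t' =>
      simp only [cdiffs, List.map_cons, List.tail_cons, List.zip_cons_cons] at ih ⊢
      rw [ih]

theorem update_idem (s : PySem.Set Int) (l : List Int) :
    PySem.Set.update (PySem.Set.update s l) l = PySem.Set.update s l := by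
  have h : ∀ y ∈ PySem.Set.ofList l, y ∈ PySem.Set.update s l := by
    intro y hy
    exact (PySem.Set.mem_update _ _ _).mpr (Or.inr ((PySem.Set.mem_ofList _ _).mp hy))
  conv_lhs => rw [PySem.Set.update_eq_append_filter]
  rw [List.filter_eq_nil_iff.mpr (by intro a ha; simp [PySem.Set.contains, h a ha]),
    List.append_nil]

theorem foldl_update_rep (g : List Int) :
    ∀ (k : Nat) (s : PySem.Set Int),
    (List.replicate (k + 1) g).foldl (fun s x => PySem.Set.update s (cdiffs x)) s
      = PySem.Set.update s (cdiffs g) := by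
  intro k
  induction k with
  | zero => intro s; simp
  | succ k ih =>
    intro s
    rw [List.replicate_succ, List.foldl_cons, ih, update_idem]

theorem foldl_update_nil_groups :
    ∀ (r : Nat) (s : PySem.Set Int),
    (List.replicate r ([] : List Int)).foldl (fun s x => PySem.Set.update s (cdiffs x)) s
      = s := by
  intro r
  induction r with
  | zero => intro s; rfl
  | succ r ih =>
    intro s
    rw [List.replicate_succ, List.foldl_cons]
    have : PySem.Set.update s (cdiffs []) = s := by
      simp [cdiffs, PySem.Set.update_nil]
    rw [this, ih]

theorem Agroups_nil (j : Nat) : ∀ r : Nat, Agroups j r [] = List.replicate r [] := by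
  intro r
  induction r with
  | zero => rfl
  | succ r ih =>
    have hstep : stepA j ([] : List (Int × Int)) = [] := by simp [stepA, survOf]
    simp [Agroups, hstep, ih, List.replicate_succ]

theorem take_shift_append (L D : List (Int × Int)) (f : Int × Int → Int × Int) (j : Nat)
    (hD : D = L.drop j) :
    ((L.take j).map f ++ D).take j = (L.take j).map f
      ∧ ((L.take j).map f ++ D).drop j = L.drop j := by
  subst hD
  have hlen : ((L.take j).map f).length = min j L.length := by simp
  rcases Nat.le_total j L.length with h | h
  · have hl : ((L.take j).map f).length = j := by omega
    constructor
    · rw [List.take_append, List.take_of_length_le (by omega), hl]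
      simp
    · rw [List.drop_append, hl]
      have h1 : ((L.take j).map f).drop j = [] := List.drop_eq_nil_of_le (by omega)
      rw [h1, Nat.sub_self, List.drop_zero, List.nil_append]
  · have hdnil : L.drop j = [] := List.drop_eq_nil_of_le h
    rw [hdnil]
    constructor
    · rw [List.append_nil, List.take_of_length_le (by omega)]
    · rw [List.append_nil, List.drop_eq_nil_of_le (by omega)]

theorem survOf_shift (g : List (Int × Int)) (k : Int) :
    survOf (g.map (fun p => (p.1, p.2 - k)))
      = (g.filter (fun p => decide (k + 1 < p.2))).map (fun p => (p.1, p.2 - (k + 1))) := by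
  induction g with
  | nil => rfl
  | cons a t ih =>
    simp only [survOf, List.map_cons, List.filter_cons] at ih ⊢
    have hd : (decide ((1:Int) < a.2 - k)) = (decide (k + 1 < a.2)) :=
      decide_eq_decide.mpr (by omega)
    rw [hd]
    by_cases hc : k + 1 < a.2
    · rw [if_pos (by simpa using hc), if_pos (by simpa using hc)]
      rw [List.map_cons]
      rw [ih]
      have : a.2 - k - 1 = a.2 - (k + 1) := by ring
      simp [this]
    · rw [if_neg (by simpa using hc), if_neg (by simpa using hc)]
      exact ih

theorem Agroups_bulk (j : Nat) :
    ∀ (k : Nat) (r' : Nat) (L : List (Int × Int)),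
    (∀ p ∈ L, 1 ≤ p.2) → (∀ p ∈ L.take j, (k : Int) ≤ p.2) →
    Agroups j (k + r') L
      = List.replicate k ((L.map Prod.fst).take j)
        ++ Agroups j r'
          (((L.take j).filter (fun p => decide ((k : Int) < p.2))).map
              (fun p => (p.1, p.2 - (k : Int))) ++ L.drop j) := by
  intro k
  induction k with
  | zero =>
    intro r' L hpos _
    simp only [Nat.zero_add, List.replicate_zero, List.nil_append, Nat.cast_zero]
    have hfil : (L.take j).filter (fun p => decide ((0:Int) < p.2)) = L.take j :=
      List.filter_eq_self.mpr (fun p hp => by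
        have := hpos p (List.mem_of_mem_take hp); simp; omega)
    rw [hfil]
    have hmap : (L.take j).map (fun p : Int × Int => (p.1, p.2 - (0:Int))) = L.take j := by
      simp
    rw [hmap, List.take_append_drop]
  | succ k ih =>
    intro r' L hpos hk
    have hk' : ∀ p ∈ L.take j, (k : Int) ≤ p.2 := fun p hp => by
      have := hk p hp; push_cast at this ⊢; omega
    have heq : (k + 1) + r' = k + (r' + 1) := by omega
    rw [heq, ih (r' + 1) L hpos hk']
    have hfilall : (L.take j).filter (fun p => decide ((k : Int) < p.2)) = L.take j :=
      List.filter_eq_self.mpr (fun p hp => by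
        have := hk p hp; push_cast at this; simp; omega)
    rw [hfilall]
    obtain ⟨htake, hdrop⟩ := take_shift_append L (L.drop j)
      (fun p : Int × Int => (p.1, p.2 - (k : Int))) j rfl
    have hAg : Agroups j (r' + 1)
          ((L.take j).map (fun p : Int × Int => (p.1, p.2 - (k : Int))) ++ L.drop j)
        = ((L.map Prod.fst).take j)
          :: Agroups j r' (stepA j
            ((L.take j).map (fun p : Int × Int => (p.1, p.2 - (k : Int))) ++ L.drop j)) := by
      show ((_ ++ L.drop j).map Prod.fst).take j :: _ = _
      congr 1
      rw [← List.map_take, htake, List.map_map]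
      have hfst : (Prod.fst ∘ fun p : Int × Int => (p.1, p.2 - (k : Int))) = Prod.fst :=
        funext (fun p => rfl)
      rw [hfst, List.map_take]
    rw [hAg]
    have hstep : stepA j
          ((L.take j).map (fun p : Int × Int => (p.1, p.2 - (k : Int))) ++ L.drop j)
        = ((L.take j).filter (fun p => decide (((k : Nat) : Int) + 1 < p.2))).map
            (fun p => (p.1, p.2 - (((k : Nat) : Int) + 1))) ++ L.drop j := by
      unfold stepA
      rw [htake, hdrop, survOf_shift]
    rw [hstep]
    have hcast : (((k + 1 : Nat) : Int)) = ((k : Nat) : Int) + 1 := by push_cast; ring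
    rw [List.replicate_succ']
    simp only [hcast, List.append_assoc, List.singleton_append]

theorem bEpoch_nonpos (n : Int) (fuel : Nat) (r : Int) (L : List (Int × Int))
    (s : PySem.Set Int) (h : r ≤ 0) : bEpoch n fuel r L s = s := by
  cases fuel with
  | zero => rfl
  | succ f =>
    show (if r ≤ 0 ∨ L = [] then s else _) = s
    rw [if_pos (Or.inl h)]

-- B's epoch recursion computes exactly the A-group diff accumulation
theorem bEpoch_eq_aux (n : Int) (hn : 0 < n) :
    ∀ (N : Nat) (r : Int) (L : List (Int × Int)) (s : PySem.Set Int),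
    r.toNat ≤ N → ((L.map Prod.fst).Nodup) → (∀ p ∈ L, 1 ≤ p.2) →
    bEpoch n N r L s
      = (Agroups n.toNat r.toNat L).foldl (fun s g => PySem.Set.update s (cdiffs g)) s := by
  intro N
  induction N with
  | zero =>
    intro r L s hN _ _
    have h0 : r.toNat = 0 := by omega
    rw [h0]
    rfl
  | succ N ih =>
    intro r L s hN hnd hpos
    by_cases hr : r ≤ 0
    · rw [bEpoch_nonpos _ _ _ _ _ hr]
      have h0 : r.toNat = 0 := by omega
      rw [h0]
      rfl
    by_cases hL : L = []
    · subst hL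
      show (if r ≤ 0 ∨ ([] : List (Int × Int)) = [] then s else _) = _
      rw [if_pos (Or.inr rfl), Agroups_nil, foldl_update_nil_groups]
    push_neg at hr
    have hj1 : 1 ≤ n.toNat := by omega
    have hslice : PySem.List.slice L none (some n) = L.take n.toNat :=
      PySem.List.slice_to _ (le_of_lt hn)
    have hdslice : PySem.List.slice L (some n) none = L.drop n.toNat :=
      PySem.List.slice_from _ (le_of_lt hn)
    set j := n.toNat with hjdef
    set g := L.take j with hgdef
    have hgne : g ≠ [] := by
      rw [hgdef]
      intro hcon
      rcases List.take_eq_nil_iff.mp hcon with h | h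
      · omega
      · exact hL h
    have hgsub : ∀ p ∈ g, p ∈ L := fun p hp => List.mem_of_mem_take (hgdef ▸ hp)
    set mc := (g.map Prod.snd).foldl min (g.headD (0, 0)).2 with hmcdef
    have hmc_le : ∀ p ∈ g, mc ≤ p.2 := by
      intro p hp
      exact (PySem.List.foldl_min_le (g.map Prod.snd) (g.headD (0, 0)).2).2 p.2
        (List.mem_map_of_mem hp)
    have hmc1 : 1 ≤ mc := by
      rcases PySem.List.foldl_min_mem (g.map Prod.snd) (g.headD (0, 0)).2 with h | h
      · have hhead : g.headD (0, 0) ∈ g := by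
          obtain ⟨a, t', hgl⟩ := List.exists_cons_of_ne_nil hgne
          rw [hgl]; simp
        have := hpos _ (hgsub _ hhead)
        rw [hmcdef] at *
        omega
      · rcases List.mem_map.mp h with ⟨q, hq, hq2⟩
        have := hpos q (hgsub q hq)
        omega
    set t := min mc r with htdef
    have ht1 : 1 ≤ t := by omega
    have htr : t ≤ r := by omega
    have htmc : t ≤ mc := by omega
    -- unfold one epoch of B
    show (if r ≤ 0 ∨ L = [] then s else _) = _
    rw [if_neg (by push_neg; exact ⟨by omega, hL⟩)]
    simp only [hslice, hdslice, ← hmcdef, ← htdef]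
    -- bulk-split A's groups at t
    have hcast : ((t.toNat : Nat) : Int) = t := Int.toNat_of_nonneg (by omega)
    have hkall : ∀ p ∈ L.take j, ((t.toNat : Nat) : Int) ≤ p.2 := by
      intro p hp
      rw [hcast]
      exact le_trans htmc (hmc_le p (hgdef ▸ hp))
    have hbulk := Agroups_bulk j t.toNat (r.toNat - t.toNat) L hpos hkall
    have hsplit : t.toNat + (r.toNat - t.toNat) = r.toNat := by omega
    rw [hsplit] at hbulk
    rw [hbulk, List.foldl_append]
    -- the replicate part is one set-update with the prefix's diffs
    have hreplfold : (List.replicate t.toNat ((L.map Prod.fst).take j)).foldl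
        (fun s x => PySem.Set.update s (cdiffs x)) s
        = PySem.Set.update s (cdiffs ((L.map Prod.fst).take j)) := by
      rw [show t.toNat = (t.toNat - 1) + 1 from by omega]
      exact foldl_update_rep _ _ _
    rw [hreplfold]
    -- identify B's recorded diffs with cdiffs of the group keys
    have hdiffs : ((g.zip g.tail).map (fun p => p.2.1 - p.1.1))
        = cdiffs ((L.map Prod.fst).take j) := by
      rw [cdiffs_map_fst, hgdef, List.map_take]
    rw [hdiffs]
    -- recursive call = the rest of the groups, by the inductive hypothesis
    have hnd' := hnd.sublist (shift_fst_sublist j t (fun p => decide (t < p.2)) L)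
    have hpos' := bulk_pos j t (by omega) L hpos
    have hNle : (r - t).toNat ≤ N := by omega
    have hih := ih (r - t)
      (((L.take j).filter (fun p => decide (t < p.2))).map (fun p => (p.1, p.2 - t))
        ++ L.drop j) (PySem.Set.update s (cdiffs ((L.map Prod.fst).take j)))
      hNle hnd' hpos'
    rw [← hgdef] at hih
    rw [hih]
    have hrt : (r - t).toNat = r.toNat - t.toNat := by omega
    rw [hrt]
    simp only [hcast, hgdef]

theorem init_items_nodup (lst : List Int) :
    ((PySem.List.sorted (PySem.Dict.counter lst).items (fun p => p.1) false).map Prod.fst).Nodup := by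
  have hperm := PySem.List.sorted_perm (PySem.Dict.counter lst).items (fun p : Int × Int => p.1) false
  have h1 : (((PySem.Dict.counter lst).items).map Prod.fst).Nodup := by
    have := PySem.Dict.nodup_keys_counter (xs := lst)
    simpa [PySem.Dict.keys] using this
  exact ((hperm.map Prod.fst).nodup_iff).mpr h1

theorem init_items_pos (lst : List Int) :
    ∀ p ∈ PySem.List.sorted (PySem.Dict.counter lst).items (fun p => p.1) false, (1 : Int) ≤ p.2 := by
  intro p hp
  rw [PySem.List.mem_sorted] at hp
  rw [PySem.Dict.items_counter] at hp
  obtain ⟨k, hk, rfl⟩ := List.mem_map.mp hp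
  have hkl : k ∈ lst := (PySem.Set.mem_ofList _ _).mp hk
  have : 0 < lst.count k := List.count_pos_iff.mpr hkl
  show (1 : Int) ≤ ((lst.count k : Int))
  exact_mod_cast this

theorem arr0_eq (lst : List Int) :
    PySem.Dict.ofList (PySem.List.sorted (PySem.Dict.counter lst).items (fun p => p.1) false)
      = PySem.Dict.mk (PySem.List.sorted (PySem.Dict.counter lst).items (fun p => p.1) false) := by
  apply PySem.Dict.ext
  show (PySem.Dict.empty.update _).items = _
  rw [PySem.Dict.update]
  have hfresh := PySem.Dict.items_foldl_insert_fresh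
    (PySem.List.sorted (PySem.Dict.counter lst).items (fun p => p.1) false)
    Prod.fst Prod.snd PySem.Dict.empty (by intro a _; rfl) (init_items_nodup lst)
  have hemp : PySem.Dict.empty.items = ([] : List (Int × Int)) := rfl
  rw [hemp] at hfresh
  rw [hfresh]
  simp

theorem union_fold_eq_diffAcc (out : List (List Int)) (s0 : PySem.Set Int) :
    out.foldl (fun (s : PySem.Set Int) x => PySem.Set.union s (aGroupDiffs x)) s0
      = out.foldl (fun s g => PySem.Set.update s (cdiffs g)) s0 := by
  apply PySem.List.foldl_congr_mem
  intro acc x _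
  rw [PySem.Set.union, aGroupDiffs_eq, update_ofList_eq]

theorem pos_of_floordiv_pos (lst : List Int) (n : Int) (hn : n ≠ 0)
    (hq : 0 < PySem.Int.floordiv (PySem.List.len lst) n) : 0 < n := by
  by_contra h
  have hneg : n < 0 := by omega
  have hfm := PySem.Int.floordiv_mul_add_mod (PySem.List.len lst) n
  have hmb := PySem.Int.mod_neg_bounds (PySem.List.len lst) hneg
  have hlen : (0 : Int) ≤ PySem.List.len lst := by
    rw [PySem.List.len_eq]; positivity
  nlinarith [hfm, hmb.1, hmb.2, hq, hlen]


-- ===== VERDICT (by name: the statement is the Claim_ definition above) =====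
theorem consecutive_nums_spec : Claim_equal_consecutive_nums := by
  intro lst n _ hpre
  unfold Spec_consecutive_nums consecutive_nums consecutive_nums_alt
  by_cases hmod : PySem.Int.mod (PySem.List.len lst) n = 0
  all_goals have hmod' : (PySem.Int.mod (↑lst.length) n = 0) ↔ (PySem.Int.mod (PySem.List.len lst) n = 0) := by rw [PySem.List.len_eq]
  · rw [if_pos (by simp [hmod']; exact hmod), if_neg (by simp [hmod']; exact hmod)]
    rcases Int.lt_or_le 0 (PySem.Int.floordiv (PySem.List.len lst) n) with hq | hq
    · have hn : 0 < n := pos_of_floordiv_pos lst n hpre hq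
      rw [arr0_eq lst]
      have hAf := A_fold n hn
        (PySem.List.pyRange 0 (PySem.Int.floordiv (PySem.List.len lst) n))
        (PySem.List.sorted (PySem.Dict.counter lst).items (fun p => p.1) false)
        ([] : List (List Int)) (init_items_nodup lst) (init_items_pos lst)
      simp only []
      rw [union_fold_eq_diffAcc, hAf, List.nil_append]
      have hlen : (PySem.List.pyRange 0 (PySem.Int.floordiv (PySem.List.len lst) n)).length
          = (PySem.Int.floordiv (PySem.List.len lst) n).toNat := by
        rw [PySem.List.length_pyRange_one]
        simp
      rw [hlen]
      rw [bEpoch_eq_aux n hn (PySem.Int.floordiv (PySem.List.len lst) n).toNat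
        (PySem.Int.floordiv (PySem.List.len lst) n)
        (PySem.List.sorted (PySem.Dict.counter lst).items (fun p => p.1) false)
        PySem.Set.empty (le_refl _) (init_items_nodup lst) (init_items_pos lst)]
    · rw [PySem.List.pyRange_one_eq_nil hq]
      simp only [bEpoch_nonpos _ _ _ _ _ hq]
      simp
  · rw [if_neg (by simp [hmod']; exact hmod), if_pos (by simp [hmod']; exact hmod)]
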